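-- pv_equiv track=rewrite | github.com/Reed-Quest/crossword | solver.py | sort_list_by_connections
-- ===== SOURCE A (Python) =====
-- def find_shared_letter(word1,word2):
--     shared_ls = []
--     for letter in word1:
--         if letter in word2:
--             shared_ls.append(letter)
--     return shared_ls
--
-- def count_shared_letters(word1,word2):
--     shared_ls = find_shared_letter(word1,word2)
--     return len(shared_ls)
--
-- def count_possible_connections(word,words_ls):
--     possible_connections_count = 0
--     for x in words_ls:
--         if x != word:
--             possible_connections_count += count_shared_letters(word,x)
--     return possible_connections_count
--
-- def get_word_lowest_connection_count(candidates,words_ls):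
--     candidate_word = candidates[0]
--     candidate_count = count_possible_connections(candidate_word,words_ls)
--     for curr_word in candidates:
--         curr_count = count_possible_connections(curr_word,words_ls)
--         if curr_count < candidate_count:
--             candidate_word = curr_word
--             candidate_count = curr_count
--     return candidate_word
--
-- def sort_list_by_connections(all_words_ls):
--     result_ls = []
--     candidate_ls = all_words_ls.copy()
--     while len(candidate_ls) > 0:
--         curr_word = get_word_lowest_connection_count(candidate_ls,all_words_ls)
--         result_ls.append(curr_word)
--         candidate_ls.remove(curr_word)
--     return result_ls
-- ===== SOURCE B (Python) =====
-- def sort_list_by_connections(all_words_ls):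
--     def connections(w):
--         return sum(sum(1 for c in w if c in x) for x in all_words_ls if x != w)
--     return sorted(all_words_ls, key=connections)
-- ===== Notes on version B (the rewrite author's own statement) =====
-- stated objective: faster
-- what changed: Replaces the repeated-rescan selection sort (recomputing every remaining candidate's connection count against the whole list on every pass) with a single stable sort keyed by each word's connection count, which Python's sorted computes once per element.
import Mathlib
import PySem

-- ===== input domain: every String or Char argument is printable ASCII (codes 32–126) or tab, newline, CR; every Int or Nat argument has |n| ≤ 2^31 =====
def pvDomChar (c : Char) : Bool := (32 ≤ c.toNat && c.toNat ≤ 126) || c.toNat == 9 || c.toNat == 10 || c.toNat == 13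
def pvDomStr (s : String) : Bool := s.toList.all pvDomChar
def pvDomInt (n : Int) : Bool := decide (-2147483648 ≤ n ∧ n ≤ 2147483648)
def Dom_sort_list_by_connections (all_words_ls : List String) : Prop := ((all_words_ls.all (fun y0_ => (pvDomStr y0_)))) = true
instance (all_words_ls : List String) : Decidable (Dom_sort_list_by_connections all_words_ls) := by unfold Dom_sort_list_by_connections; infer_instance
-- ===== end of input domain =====

-- B replaces A's repeated-rescan selection sort (recomputing every candidate's connection count on
-- each pass, O(N^3*L)) by one stable library sort on the per-word connection count, computed once
-- per comparison key by Python's sorted (O(N^2*L)): objective = faster.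

-- ===== PORT A =====
-- `letter in word2` on a 1-char string is exactly char membership in word2's characters (exact here).
def pvFindShared (word1 word2 : List Char) : List Char :=
  word1.foldl (fun acc letter => if letter ∈ word2 then acc ++ [letter] else acc) []

def pvCountShared (word1 word2 : List Char) : Nat :=
  (pvFindShared word1 word2).length

def pvCountConn (word : String) (words_ls : List String) : Nat :=
  words_ls.foldl (fun acc x => if x ≠ word then acc + pvCountShared word.toList x.toList else acc) 0

-- get_word_lowest_connection_count; A only calls it on a nonempty candidate list
def pvGetLowest (candidates : List String) (words_ls : List String) : String :=
  match candidates with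
  | [] => ""  -- unreachable: A indexes candidates[0]; the loop guarantees candidates ≠ []
  | c :: _ =>
    (candidates.foldl
      (fun (st : String × Nat) curr_word =>
        let curr_count := pvCountConn curr_word words_ls
        if curr_count < st.2 then (curr_word, curr_count) else st)
      (c, pvCountConn c words_ls)).1

-- the while-loop, with fuel = initial length (the selected word is a member, so
-- `candidate_ls.remove` = List.erase of a member, shrinking the list by one each pass)
def pvSelLoop (all_words_ls : List String) : Nat → List String → List String
  | _, [] => []
  | 0, _ :: _ => []  -- fuel guard, never reached
  | fuel + 1, c :: rest =>
    let curr_word := pvGetLowest (c :: rest) all_words_ls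
    curr_word :: pvSelLoop all_words_ls fuel ((c :: rest).erase curr_word)

def sort_list_by_connections (all_words_ls : List String) : List String :=
  pvSelLoop all_words_ls all_words_ls.length all_words_ls

-- ===== PORT B =====
def pvConnections (all_words_ls : List String) (w : String) : Nat :=
  ((all_words_ls.filter (fun x => x ≠ w)).map
    (fun x => w.toList.countP (fun c => c ∈ x.toList))).sum

def sort_list_by_connections_alt (all_words_ls : List String) : List String :=
  PySem.List.sorted all_words_ls (pvConnections all_words_ls) false

-- ===== PRECONDITION & SPEC =====
def Spec_sort_list_by_connections (all_words_ls : List String) (out : List String) : Prop := out = sort_list_by_connections_alt all_words_ls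
instance (all_words_ls : List String) (out : List String) : Decidable (Spec_sort_list_by_connections all_words_ls out) := by unfold Spec_sort_list_by_connections; infer_instance

-- ===== CLAIM (what is proved, stated in full; the proofs are below) =====
def Claim_equal_sort_list_by_connections : Prop := ∀ (all_words_ls : List String), Dom_sort_list_by_connections all_words_ls → Spec_sort_list_by_connections all_words_ls (sort_list_by_connections all_words_ls)

-- ===== LEMMAS AND PROOFS =====

-- the two key functions agree
theorem pvCountShared_eq (w1 w2 : List Char) :
    pvCountShared w1 w2 = w1.countP (fun c => decide (c ∈ w2)) := by
  unfold pvCountShared pvFindShared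
  induction w1 using List.reverseRecOn with
  | nil => rfl
  | append_singleton t a ih =>
    simp only [List.foldl_append, List.foldl_cons, List.foldl_nil, List.countP_append]
    split_ifs with h <;> simp [h, ih]

theorem pvKeys_eq (all : List String) (w : String) :
    pvCountConn w all = pvConnections all w := by
  unfold pvCountConn pvConnections
  induction all using List.reverseRecOn with
  | nil => rfl
  | append_singleton t a ih =>
    rw [List.foldl_append, List.filter_append, List.map_append, List.sum_append, ih]
    by_cases h : a = w
    · simp [h]
    · simp [h, pvCountShared_eq]

-- insertBy facts (before = strict key comparison)
theorem pv_insertBy_front {α : Type} (before : α → α → Bool) (x : α) (ys : List α)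
    (h : ∀ y ∈ ys, before x y = true) :
    PySem.List.insertBy before x ys = x :: ys := by
  cases ys with
  | nil => rfl
  | cons y t => simp [PySem.List.insertBy, h y (by simp)]

theorem pv_insertBy_tail {α : Type} (before : α → α → Bool) (x m : α) (t : List α)
    (h : before x m = false) :
    PySem.List.insertBy before x (m :: t) = m :: PySem.List.insertBy before x t := by
  simp [PySem.List.insertBy, h]

theorem pv_foldl_insertBy_cons {α : Type} (before : α → α → Bool) (m : α) :
    ∀ (l : List α) (acc : List α), (∀ x ∈ l, before x m = false) →
    l.foldl (fun acc x => PySem.List.insertBy before x acc) (m :: acc) =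
      m :: l.foldl (fun acc x => PySem.List.insertBy before x acc) acc := by
  intro l
  induction l with
  | nil => intro acc _; rfl
  | cons a t ih =>
    intro acc h
    simp only [List.foldl_cons]
    rw [pv_insertBy_tail before a m acc (h a (by simp))]
    exact ih _ (fun x hx => h x (by simp [hx]))

-- stable sort extracts the FIRST minimal-key element at the head
theorem pv_sorted_extract {κ : Type} [LinearOrder κ] (k : String → κ)
    (pre suf : List String) (m : String)
    (hpre : ∀ y ∈ pre, k m < k y) (hsuf : ∀ y ∈ suf, k m ≤ k y) :
    PySem.List.sorted (pre ++ m :: suf) k false =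
      m :: PySem.List.sorted (pre ++ suf) k false := by
  rw [PySem.List.sorted_eq_foldl_insertBy, PySem.List.sorted_eq_foldl_insertBy]
  set before := fun a b : String => decide (k a < k b) with hb
  rw [List.foldl_append, List.foldl_cons, List.foldl_append]
  set acc := pre.foldl (fun acc x => PySem.List.insertBy before x acc) [] with hacc
  have hmemacc : ∀ y ∈ acc, y ∈ pre := by
    intro y hy
    have : y ∈ PySem.List.sorted pre k false := by
      rw [PySem.List.sorted_eq_foldl_insertBy]; exact hy
    exact (PySem.List.mem_sorted _ _ _ _).1 this
  have h1 : PySem.List.insertBy before m acc = m :: acc := by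
    refine pv_insertBy_front before m acc (fun y hy => ?_)
    simp only [hb, decide_eq_true_eq]
    exact hpre y (hmemacc y hy)
  rw [h1]
  refine pv_foldl_insertBy_cons before m suf acc (fun x hx => ?_)
  simp only [hb, decide_eq_false_iff_not, not_lt]
  exact hsuf x hx

-- characterisation of A's selection fold: its result, global minimality, and the
-- "first index achieving the minimum" split
theorem pv_pickFold_spec {κ : Type} [LinearOrder κ] (k : String → κ) :
    ∀ (l : List String) (w : String), ∃ r : String,
      l.foldl (fun (st : String × κ) curr =>
          if k curr < st.2 then (curr, k curr) else st) (w, k w) = (r, k r) ∧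
      (∀ y ∈ l, k r ≤ k y) ∧ k r ≤ k w ∧
      (r = w ∨ (k r < k w ∧ ∃ pre suf, l = pre ++ r :: suf ∧ ∀ y ∈ pre, k r < k y)) := by
  intro l
  induction l with
  | nil => intro w; exact ⟨w, rfl, by simp, le_rfl, Or.inl rfl⟩
  | cons a t ih =>
    intro w
    by_cases hlt : k a < k w
    · obtain ⟨r, heq, h1, h2, h3⟩ := ih a
      refine ⟨r, by simpa [hlt] using heq, ?_, le_trans h2 (le_of_lt hlt), ?_⟩
      · intro y hy
        rcases List.mem_cons.1 hy with rfl | hy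
        · exact h2
        · exact h1 y hy
      · rcases h3 with h | ⟨hlt2, pre, suf, hsplit, hpre⟩
        · exact Or.inr ⟨h ▸ hlt, [], t, by simp [h], by simp⟩
        · exact Or.inr ⟨lt_trans hlt2 hlt, a :: pre, suf, by rw [hsplit]; rfl,
            fun y hy => (List.mem_cons.1 hy).elim (fun h => h ▸ hlt2) (hpre y)⟩
    · obtain ⟨r, heq, h1, h2, h3⟩ := ih w
      have haw : k w ≤ k a := not_lt.1 hlt
      refine ⟨r, by simpa [hlt] using heq, ?_, h2, ?_⟩
      · intro y hy
        rcases List.mem_cons.1 hy with rfl | hy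
        · exact le_trans h2 haw
        · exact h1 y hy
      · rcases h3 with h | ⟨hlt2, pre, suf, hsplit, hpre⟩
        · exact Or.inl h
        · exact Or.inr ⟨hlt2, a :: pre, suf, by rw [hsplit]; rfl,
            fun y hy => (List.mem_cons.1 hy).elim
              (fun h => h ▸ lt_of_lt_of_le hlt2 haw) (hpre y)⟩

-- A's selection loop IS the stable sort by the connection-count key
theorem pv_selLoop_eq_sorted (all : List String) :
    ∀ (fuel : Nat) (cand : List String), cand.length ≤ fuel →
      pvSelLoop all fuel cand =
        PySem.List.sorted cand (fun w => pvCountConn w all) false := by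
  intro fuel
  induction fuel with
  | zero =>
    intro cand hlen
    have : cand = [] := List.length_eq_zero_iff.1 (Nat.le_zero.1 hlen)
    subst this; rfl
  | succ f ih =>
    intro cand hlen
    cases cand with
    | nil => rfl
    | cons c rest =>
      obtain ⟨m, heq, hmin, hle, hsplit⟩ :=
        pv_pickFold_spec (fun w => pvCountConn w all) (c :: rest) c
      have hgl : pvGetLowest (c :: rest) all = m := by
        unfold pvGetLowest
        exact congrArg Prod.fst heq
      obtain ⟨pre, suf, hdecomp, hpre⟩ :
          ∃ pre suf, c :: rest = pre ++ m :: suf ∧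
            ∀ y ∈ pre, pvCountConn m all < pvCountConn y all := by
        rcases hsplit with h | ⟨_, pre, suf, hd, hp⟩
        · exact ⟨[], rest, by simp [h], by simp⟩
        · exact ⟨pre, suf, hd, hp⟩
      have hmnotpre : m ∉ pre := fun hmem => lt_irrefl _ (hpre m hmem)
      have herase : (c :: rest).erase m = pre ++ suf := by
        rw [hdecomp, List.erase_append_right _ hmnotpre, List.erase_cons_head]
      have hmem : m ∈ c :: rest := by rw [hdecomp]; simp
      have hlen2 : ((c :: rest).erase m).length ≤ f := by
        rw [List.length_erase_of_mem hmem]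
        simpa using Nat.le_of_succ_le_succ hlen
      have hsuf : ∀ y ∈ suf, pvCountConn m all ≤ pvCountConn y all := by
        intro y hy
        exact hmin y (by rw [hdecomp]; simp [hy])
      calc pvSelLoop all (f + 1) (c :: rest)
          = m :: pvSelLoop all f ((c :: rest).erase m) := by
            simp only [pvSelLoop]; rw [hgl]
        _ = m :: PySem.List.sorted ((c :: rest).erase m)
              (fun w => pvCountConn w all) false := by rw [ih _ hlen2]
        _ = PySem.List.sorted (c :: rest) (fun w => pvCountConn w all) false := by
            rw [herase, hdecomp,
              pv_sorted_extract (fun w => pvCountConn w all) pre suf m hpre hsuf]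

-- ===== VERDICT (by name: the statement is the Claim_ definition above) =====
theorem sort_list_by_connections_spec : Claim_equal_sort_list_by_connections := by
  intro all _
  unfold Spec_sort_list_by_connections
  unfold sort_list_by_connections sort_list_by_connections_alt
  rw [pv_selLoop_eq_sorted all all.length all le_rfl]
  congr 1
  funext w
  exact pvKeys_eq all w
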